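-- pv_equiv track=rewrite | github.com/hanjoondev/zb-study | TestDataGenerator.py | ans_a02164
-- ===== SOURCE A (Python) =====
-- def ans_a02164(n: int) -> int:
--     """ return the expected answer for acmicpc.A02164 """
--     if n < 2:
--         return n
--     exp = 1
--     while 2**exp < n:
--         exp += 1
--     exp -= 1
--     return (n - 2**exp) * 2
-- ===== SOURCE B (Python) =====
-- def ans_a02164(n: int) -> int:
--     """ return the expected answer for acmicpc.A02164 """
--     if n < 2:
--         return n
--     p = 1 << ((n - 1).bit_length() - 1)
--     return (n - p) * 2
-- ===== Notes on version B (the rewrite author's own statement) =====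
-- stated objective: faster
-- what changed: Replaced the while-loop search for the largest power of two below n with a closed-form bit_length computation: p = 1 << ((n-1).bit_length()-1).
import Mathlib
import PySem

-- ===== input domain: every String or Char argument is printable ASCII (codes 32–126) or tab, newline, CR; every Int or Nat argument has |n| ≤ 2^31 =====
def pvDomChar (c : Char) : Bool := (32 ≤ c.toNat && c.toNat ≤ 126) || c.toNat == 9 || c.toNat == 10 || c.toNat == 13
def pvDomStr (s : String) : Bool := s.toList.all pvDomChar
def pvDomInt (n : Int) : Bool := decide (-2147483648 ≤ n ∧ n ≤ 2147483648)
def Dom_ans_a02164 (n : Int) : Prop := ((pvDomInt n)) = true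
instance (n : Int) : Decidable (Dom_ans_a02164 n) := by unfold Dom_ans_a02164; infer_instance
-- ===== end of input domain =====

-- B replaces A's while-loop search for the largest power of two below n by a
-- closed-form bit-length computation (a constant number of operations instead of the loop).

-- ===== PORT A =====
-- the while loop: 'while 2**exp < n: exp += 1'
def pvLoopA (n : Int) (exp : Nat) : Nat :=
  if (2 : Int) ^ exp < n then pvLoopA n (exp + 1) else exp
termination_by n.toNat - 2 ^ exp
decreasing_by
  rename_i h
  have h1 : 2 ^ exp < n.toNat := by rw [Int.lt_toNat]; push_cast; exact h
  have h2 : (2 : Nat) ^ exp < 2 ^ (exp + 1) :=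
    Nat.pow_lt_pow_right (by norm_num) (Nat.lt_succ_self exp)
  exact Nat.sub_lt_sub_left h1 h2

def ans_a02164 (n : Int) : Int :=
  if n < 2 then n
  else
    let exp := pvLoopA n 1
    let exp := exp - 1
    (n - 2 ^ exp) * 2

-- ===== PORT B =====
-- (n-1).bit_length() - 1 for n ≥ 2 is Nat.log2 of (n-1); p = 1 <<< that.
def ans_a02164_alt (n : Int) : Int :=
  if n < 2 then n
  else
    let p : Nat := 1 <<< Nat.log2 (n - 1).toNat
    (n - (p : Int)) * 2

-- ===== PRECONDITION & SPEC =====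
def Spec_ans_a02164 (n : Int) (out : Int) : Prop := out = ans_a02164_alt n
instance (n : Int) (out : Int) : Decidable (Spec_ans_a02164 n out) := by unfold Spec_ans_a02164; infer_instance

-- ===== CLAIM (what is proved, stated in full; the proofs are below) =====
def Claim_equal_ans_a02164 : Prop := ∀ (n : Int), Dom_ans_a02164 n → Spec_ans_a02164 n (ans_a02164 n)

-- ===== LEMMAS AND PROOFS =====

-- if 2^k < n ≤ 2^(k+1) then the loop started anywhere at exp ≤ k+1 stops at k+1
theorem pvLoopA_eq (n : Int) (k : Nat) (hlb : (2 : Int) ^ k < n) (hub : n ≤ 2 ^ (k + 1)) :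
    ∀ d exp, exp + d = k + 1 → pvLoopA n exp = k + 1 := by
  intro d
  induction d with
  | zero =>
    intro exp h
    rw [pvLoopA.eq_def]
    have : ¬ ((2 : Int) ^ exp < n) := by
      subst_vars; simpa using not_lt.mpr hub
    simp [this]; omega
  | succ d ih =>
    intro exp h
    rw [pvLoopA.eq_def]
    have hexp : exp ≤ k := by omega
    have : (2 : Int) ^ exp < n :=
      lt_of_le_of_lt (pow_le_pow_right₀ (by norm_num) hexp) hlb
    simp [this]
    exact ih (exp + 1) (by omega)

theorem ans_a02164_eq_alt (n : Int) : ans_a02164 n = ans_a02164_alt n := by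
  unfold ans_a02164 ans_a02164_alt
  by_cases hn : n < 2
  · simp [hn]
  · simp only [hn, if_false]
    rw [not_lt] at hn
    set m : Nat := (n - 1).toNat with hm
    have hmn : (m : Int) = n - 1 := by simp [hm]; omega
    have hm1 : 1 ≤ m := by omega
    set k : Nat := Nat.log2 m with hk
    have hlow : 2 ^ k ≤ m := Nat.log2_self_le (by omega)
    have hhigh : m < 2 ^ (k + 1) := Nat.lt_log2_self
    have hlb : (2 : Int) ^ k < n := by
      have : ((2 ^ k : Nat) : Int) ≤ (m : Int) := by exact_mod_cast hlow
      push_cast at this ⊢; omega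
    have hub : n ≤ (2 : Int) ^ (k + 1) := by
      have : (m : Int) < ((2 ^ (k + 1) : Nat) : Int) := by exact_mod_cast hhigh
      push_cast at this ⊢; omega
    have hloop : pvLoopA n 1 = k + 1 := pvLoopA_eq n k hlb hub k 1 (by omega)
    simp only [hloop]
    have hshift : (1 <<< k : Nat) = 2 ^ k := by simp [Nat.shiftLeft_eq]
    simp only [Nat.add_sub_cancel, hshift]
    push_cast
    ring

-- ===== VERDICT (by name: the statement is the Claim_ definition above) =====
theorem ans_a02164_spec : Claim_equal_ans_a02164 := by
  intro n _
  exact ans_a02164_eq_alt n
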